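-- pv_equiv track=rewrite | github.com/NikolaPavlov/HackBulgaria | week01/week01_02/p04_NumberContainingASingleDigit.py | contains_digit
-- ===== SOURCE A (Python) =====
-- def contains_digit(number, digit):
--     while(number > 0):
--         lastDigit = number % 10
--         if (lastDigit == digit):
--             return True
--             break
--         number //= 10
--     return False
-- ===== SOURCE B (Python) =====
-- def contains_digit(number, digit):
--     if number <= 0:
--         return False
--     return digit in [int(c) for c in str(number)]
-- ===== Notes on version B (the rewrite author's own statement) =====
-- stated objective: idiomatic
-- what changed: B tests digit membership over the decimal string's characters (str + comprehension + in) instead of A's modulo/floor-division peeling loop.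
import Mathlib
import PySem

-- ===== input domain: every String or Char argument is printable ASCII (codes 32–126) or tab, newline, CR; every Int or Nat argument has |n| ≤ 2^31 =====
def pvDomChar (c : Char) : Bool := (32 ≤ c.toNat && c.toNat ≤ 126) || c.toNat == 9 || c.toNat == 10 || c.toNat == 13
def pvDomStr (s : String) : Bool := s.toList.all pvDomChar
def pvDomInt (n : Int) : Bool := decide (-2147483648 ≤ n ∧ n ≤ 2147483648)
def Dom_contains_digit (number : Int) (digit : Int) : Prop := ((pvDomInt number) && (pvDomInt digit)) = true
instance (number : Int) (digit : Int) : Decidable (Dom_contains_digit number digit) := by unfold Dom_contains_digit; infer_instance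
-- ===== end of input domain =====

-- B replaces A's modulo/floor-division digit-peeling loop by a membership test over
-- the decimal string's characters (idiomatic; same asymptotic cost).


-- ===== PORT A =====
-- while number > 0: lastDigit = number % 10; if lastDigit == digit: return True; number //= 10
def contains_digit (number : Int) (digit : Int) : Bool :=
  if _h : number > 0 then
    let lastDigit := PySem.Int.mod number 10
    if lastDigit == digit then true
    else contains_digit (PySem.Int.floordiv number 10) digit
  else false
termination_by number.toNat
decreasing_by
  simp only [PySem.Int.floordiv, Int.fdiv_eq_ediv]
  omega

-- ===== PORT B =====
-- int(c) for a single decimal digit character c is exactly c.toNat - 48 (exact here: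
-- str(number) of a positive int consists of '0'..'9' only)
def pyIntOfDigitChar (c : Char) : Int := (c.toNat : Int) - 48

def contains_digit_alt (number : Int) (digit : Int) : Bool :=
  if number ≤ 0 then false
  else ((PySem.Int.toStr number).toList.map pyIntOfDigitChar).contains digit

-- ===== PRECONDITION & SPEC =====
def Spec_contains_digit (number : Int) (digit : Int) (out : Bool) : Prop := out = contains_digit_alt number digit
instance (number : Int) (digit : Int) (out : Bool) : Decidable (Spec_contains_digit number digit out) := by unfold Spec_contains_digit; infer_instance

-- ===== CLAIM (what is proved, stated in full; the proofs are below) =====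
def Claim_equal_contains_digit : Prop := ∀ (number : Int) (digit : Int), Dom_contains_digit number digit → Spec_contains_digit number digit (contains_digit number digit)

-- ===== LEMMAS AND PROOFS =====

-- big-endian decimal representation, same shape as Nat.toDigitsCore's result
def rep (n : Nat) : List Char :=
  if _h : n / 10 = 0 then [Nat.digitChar (n % 10)]
  else rep (n / 10) ++ [Nat.digitChar (n % 10)]
termination_by n
decreasing_by omega

theorem toDigitsCore_eq_rep (fuel : Nat) : ∀ (n : Nat) (acc : List Char), n < fuel →
    Nat.toDigitsCore 10 fuel n acc = rep n ++ acc := by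
  induction fuel with
  | zero => intro n acc h; omega
  | succ f ih =>
    intro n acc h
    rw [Nat.toDigitsCore, rep]
    by_cases h0 : n / 10 = 0
    · simp [h0]
    · simp only [h0, if_neg, dif_neg, not_false_iff]
      rw [ih (n / 10) _ (by omega)]
      simp

theorem chv_digitChar (r : Nat) (h : r < 10) : pyIntOfDigitChar (Nat.digitChar r) = (r : Int) := by
  interval_cases r <;> decide

theorem contains_digit_nat (n : Nat) : ∀ (digit : Int), 0 < n →
    contains_digit (n : Int) digit = ((rep n).map pyIntOfDigitChar).contains digit := by
  induction n using Nat.strong_induction_on with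
  | _ n ih =>
    intro digit hn
    rw [contains_digit.eq_def, rep]
    have hpos : ((n : Int) > 0) := by exact_mod_cast hn
    rw [dif_pos hpos]
    have hmod : PySem.Int.mod (n : Int) 10 = ((n % 10 : Nat) : Int) := by
      simp only [PySem.Int.mod, Int.fmod_eq_emod]
      rw [if_pos (Or.inl (by norm_num))]
      push_cast; omega
    have hdiv : PySem.Int.floordiv (n : Int) 10 = ((n / 10 : Nat) : Int) := by
      simp only [PySem.Int.floordiv, Int.fdiv_eq_ediv]
      rw [if_pos (Or.inl (by norm_num))]
      push_cast; omega
    rw [hmod, hdiv]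
    have hr : n % 10 < 10 := Nat.mod_lt _ (by norm_num)
    by_cases heq : ((n % 10 : Nat) : Int) = digit
    · simp only [heq, beq_self_eq_true, if_true]
      split_ifs with h0 <;>
        simp [List.contains_eq_mem, chv_digitChar _ hr, heq]
    · rw [if_neg (by simpa using heq)]
      by_cases h0 : n / 10 = 0
      · rw [dif_pos h0]
        have : contains_digit ((0 : Nat) : Int) digit = false := by
          rw [contains_digit.eq_def]; simp
        simp only [h0] at *
        rw [this]
        simp [List.contains_eq_mem, chv_digitChar _ hr]
        omega
      · rw [dif_neg h0, ih (n / 10) (by omega) digit (by omega)]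
        simp [List.contains_eq_mem, chv_digitChar _ hr]
        intro h; omega

-- ===== VERDICT (by name: the statement is the Claim_ definition above) =====
theorem contains_digit_spec : Claim_equal_contains_digit := by
  intro number digit _
  unfold Spec_contains_digit contains_digit_alt
  by_cases hpos : number > 0
  · rw [if_neg (by omega)]
    have hnum : number = ((number.toNat : Nat) : Int) := by omega
    rw [hnum, contains_digit_nat number.toNat digit (by omega)]
    have : (PySem.Int.toStr ((number.toNat : Nat) : Int)).toList
        = rep number.toNat := by
      rw [PySem.Int.toList_toStr]
      simp only [PySem.Int.toChars]
      rw [if_neg (by omega)]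
      have : (((number.toNat : Nat) : Int)).toNat = number.toNat := by omega
      rw [this, Nat.toDigits, toDigitsCore_eq_rep _ _ _ (by omega)]
      simp
    rw [this]
  · rw [if_pos (by omega), contains_digit.eq_def]
    simp [hpos]
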